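-- pv_equiv track=rewrite | github.com/AlgoAlgo42/AlgoAlgo | [Level 1] 신규 아이디 추천/kyoon.py | solution
-- ===== SOURCE A (Python) =====
-- def is_sign(c):
--     sign = ['.', '-', '_']
--     for s in sign:
--         if s == c:
--             return True
--     return False
--
-- def rm_end_dot(str):
--     while len(str) > 0 and str[-1] == '.':
--         str.pop()
--     return str
--
-- def is_dotted(i, str):
--     l = len(str)
--     if l > i + 1 and str[i + 1] == '.':
--         return True
--     else:
--         return False
--
-- def solution(new_id):
--     answer = []
--     new_id = new_id.lower()
--
--     for c in new_id:
--         if c.isalpha() or c.isdigit() or is_sign(c) :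
--             answer += c
--     new_id = answer
--     answer = []
--
--     for i in range(len(new_id)):
--         if new_id[i] == '.' and is_dotted(i, new_id):
--             continue
--         else:
--             answer += new_id[i]
--     new_id = answer
--
--     new_id = list(new_id)
--     while len(new_id) > 0 and new_id[0] == '.':
--         new_id.remove('.')
--
--     new_id = rm_end_dot(new_id)
--
--     if len(new_id) == 0:
--         new_id = 'a'
--
--     while len(new_id) >= 16:
--         new_id.pop()
--         new_id = rm_end_dot(new_id)
--
--
--     while (len(new_id) > 0 and len(new_id) < 3):
--         new_id += (new_id[-1])
--
--     answer = "".join(new_id)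
--
--
--     return answer
-- ===== SOURCE B (Python) =====
-- def solution(new_id):
--     # single fused pass: keep allowed chars, collapsing runs of dots as we go
--     kept = []
--     for c in new_id.lower():
--         if c.isalpha() or c.isdigit() or c in '.-_':
--             if not (c == '.' and kept and kept[-1] == '.'):
--                 kept.append(c)
--     s = ''.join(kept).strip('.')
--     if not s:
--         s = 'a'
--     elif len(s) > 15:
--         s = s[:15].rstrip('.')
--     if len(s) < 3:
--         s = s + s[-1] * (3 - len(s))
--     return s
-- ===== Notes on version B (the rewrite author's own statement) =====
-- stated objective: faster
-- what changed: A's six sequential cleanup loops (filter, index-based dot-run skip, remove-leading-dots via list.remove, pop-trailing-dots, pop-and-restrip truncation, append padding) are replaced by one fused filter-and-collapse pass followed by a both-ends dot strip, a single slice-plus-right-strip truncation, and arithmetic padding with replicate.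
import Mathlib
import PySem

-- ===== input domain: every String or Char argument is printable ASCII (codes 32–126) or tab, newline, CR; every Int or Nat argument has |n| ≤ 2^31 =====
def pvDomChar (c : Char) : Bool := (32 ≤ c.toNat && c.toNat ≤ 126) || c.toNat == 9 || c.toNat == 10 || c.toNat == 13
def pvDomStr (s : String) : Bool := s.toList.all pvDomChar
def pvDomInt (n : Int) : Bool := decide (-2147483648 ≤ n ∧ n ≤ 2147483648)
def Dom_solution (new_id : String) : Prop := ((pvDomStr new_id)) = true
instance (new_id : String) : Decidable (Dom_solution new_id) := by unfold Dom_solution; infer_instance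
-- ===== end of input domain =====

-- B replaces A's six sequential cleanup loops by one fused filter-and-collapse pass plus
-- library strip/slice/pad steps (objective: faster by a constant factor; measured).

-- ===== PORT A =====

-- is_sign: loop over ['.', '-', '_'] returning True on first match
def isSign (c : Char) : Bool := ['.', '-', '_'].any (fun s => s == c)

-- rm_end_dot: while len(str) > 0 and str[-1] == '.': str.pop()
def rmEndDot (s : List Char) : List Char :=
  if h : s ≠ [] ∧ s.getLast? = some '.' then rmEndDot s.dropLast else s
termination_by s.length
decreasing_by
  exact List.length_dropLast ▸
    Nat.sub_lt (List.length_pos_of_ne_nil h.1) Nat.one_pos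

-- is_dotted(i, str): len(str) > i + 1 and str[i+1] == '.'
def isDotted (i : Int) (s : List Char) : Bool :=
  decide (PySem.List.len s > i + 1) && (PySem.List.pyGetD s (i + 1) ' ' == '.')

-- while len(new_id) > 0 and new_id[0] == '.': new_id.remove('.')
-- (when new_id[0] == '.', list.remove('.') deletes exactly that head element — exact)
def removeLeadingDots : List Char → List Char
  | [] => []
  | c :: t => if c = '.' then removeLeadingDots t else c :: t

-- while len(new_id) >= 16: new_id.pop(); new_id = rm_end_dot(new_id)
-- (termination helper for truncLoop, cited by its decreasing_by)
theorem rmEndDot_length_le (s : List Char) : (rmEndDot s).length ≤ s.length := by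
  fun_induction rmEndDot s with
  | case1 s h ih =>
      have hs : s ≠ [] := h.1
      have h2 : s.dropLast.length = s.length - 1 := List.length_dropLast
      omega
  | case2 s h => exact le_refl _

def truncLoop (s : List Char) : List Char :=
  if s.length ≥ 16 then truncLoop (rmEndDot s.dropLast) else s
termination_by s.length
decreasing_by
  rename_i hl
  exact lt_of_le_of_lt (rmEndDot_length_le _)
    (List.length_dropLast ▸ Nat.sub_lt (Nat.lt_of_lt_of_le (by norm_num) hl) Nat.one_pos)

-- while len(new_id) > 0 and len(new_id) < 3: new_id += new_id[-1]
def padLoop (s : List Char) : List Char :=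
  if 0 < s.length ∧ s.length < 3 then padLoop (s ++ [PySem.List.pyGetD s (-1) ' ']) else s
termination_by 3 - s.length
decreasing_by
  rename_i hp
  simp only [List.length_append, List.length_cons, List.length_nil, Nat.zero_add]
  exact Nat.sub_succ_lt_self 3 s.length hp.2

def solution (new_id : String) : String :=
  let id0 := PySem.Chars.lower new_id.toList
  -- first loop: keep letters, digits and signs
  let a1 := id0.foldl (fun acc c =>
      if PySem.Chars.isalpha c || PySem.Chars.isdigit c || isSign c then acc ++ [c] else acc) []
  -- second loop: for i in range(len(new_id)): skip a '.' that is followed by another '.'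
  let a2 := (PySem.List.pyRange 0 (PySem.List.len a1) 1).foldl (fun acc i =>
      if (PySem.List.pyGetD a1 i ' ' == '.') && isDotted i a1 then acc
      else acc ++ [PySem.List.pyGetD a1 i ' ']) []
  let a3 := removeLeadingDots a2
  let a4 := rmEndDot a3
  let a5 := if a4.length = 0 then ['a'] else a4
  let a6 := truncLoop a5
  let a7 := padLoop a6
  String.ofList a7  -- "".join of single characters

-- ===== PORT B =====

-- s.rstrip('.') — ported by hand (strip from the right via reverse), exact
def rstripDots (s : List Char) : List Char := (s.reverse.dropWhile (· == '.')).reverse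

def solution_alt (new_id : String) : String :=
  -- fused pass: keep allowed chars, collapsing runs of dots as we go
  let kept := (PySem.Chars.lower new_id.toList).foldl (fun acc c =>
      if PySem.Chars.isalpha c || PySem.Chars.isdigit c || ['.', '-', '_'].contains c then
        if (c == '.') && (acc.getLast? == some '.') then acc else acc ++ [c]
      else acc) []
  let s1 := PySem.Chars.stripChars kept ['.']
  let s2 := if s1 = [] then ['a']
            else if s1.length > 15 then rstripDots (PySem.List.slice s1 none (some 15))
            else s1
  let s3 := if s2.length < 3 then s2 ++ List.replicate (3 - s2.length) (PySem.List.pyGetD s2 (-1) 'a')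
            else s2
  String.ofList s3

-- ===== PRECONDITION & SPEC =====
def Spec_solution (new_id : String) (out : String) : Prop := out = solution_alt new_id
instance (new_id : String) (out : String) : Decidable (Spec_solution new_id out) := by unfold Spec_solution; infer_instance

-- ===== CLAIM (what is proved, stated in full; the proofs are below) =====
def Claim_equal_solution : Prop := ∀ (new_id : String), Dom_solution new_id → Spec_solution new_id (solution new_id)

-- ===== LEMMAS AND PROOFS =====

-- keep-last collapse of dot runs (what A's index loop computes)
def collapse : List Char → List Char
  | [] => []
  | c :: t => if c = '.' ∧ t.head? = some '.' then collapse t else c :: collapse t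

-- keep-first collapse with explicit previous character (what B's fused pass computes)
def goC (p : Option Char) : List Char → List Char
  | [] => []
  | c :: t => if c = '.' ∧ p = some '.' then goC p t else c :: goC (some c) t

-- isSign is membership in '.-_'
lemma isSign_eq_contains (c : Char) : isSign c = ['.', '-', '_'].contains c := by
  unfold isSign
  rcases eq_or_ne c '.' with rfl | h1
  · decide
  rcases eq_or_ne c '-' with rfl | h2
  · decide
  rcases eq_or_ne c '_' with rfl | h3
  · decide
  have e1 : ('.' == c) = false := beq_eq_false_iff_ne.mpr (Ne.symm h1)
  have e2 : ('-' == c) = false := beq_eq_false_iff_ne.mpr (Ne.symm h2)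
  have e3 : ('_' == c) = false := beq_eq_false_iff_ne.mpr (Ne.symm h3)
  simp [e1, e2, e3, h1, h2, h3]

-- membership in ['.'] is equality with '.'
lemma contains_dot (c : Char) : (['.'] : List Char).contains c = (c == '.') := by
  rcases eq_or_ne c '.' with rfl | h
  · decide
  · have e : (c == '.') = false := beq_eq_false_iff_ne.mpr h
    simp [e, h]

-- ----- A's first loop is a filter -----
lemma loop1_eq_filter (l : List Char) :
    l.foldl (fun acc c =>
      if PySem.Chars.isalpha c || PySem.Chars.isdigit c || isSign c then acc ++ [c] else acc) []
    = l.filter (fun c => PySem.Chars.isalpha c || PySem.Chars.isdigit c || isSign c) := by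
  simpa using PySem.List.foldl_append_if
    (fun c => PySem.Chars.isalpha c || PySem.Chars.isdigit c || isSign c) id l []

lemma filter_keep_eq (l : List Char) :
    l.filter (fun c => PySem.Chars.isalpha c || PySem.Chars.isdigit c || ['.', '-', '_'].contains c)
    = l.filter (fun c => PySem.Chars.isalpha c || PySem.Chars.isdigit c || isSign c) := by
  apply List.filter_congr
  intro c _
  rw [isSign_eq_contains]

-- ----- A's index loop computes `collapse` -----
lemma foldl_range_collapse (s : List Char) :
    ∀ (t pre : List Char) (acc : List Char), s = pre ++ t →
    (PySem.List.pyRange (pre.length) (PySem.List.len s) 1).foldl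
      (fun acc i => if (PySem.List.pyGetD s i ' ' == '.') && isDotted i s then acc
        else acc ++ [PySem.List.pyGetD s i ' ']) acc
    = acc ++ collapse t := by
  intro t
  induction t with
  | nil =>
    intro pre acc hs
    rw [PySem.List.pyRange_one_eq_nil (by subst hs; simp [PySem.List.len_eq])]
    simp [collapse]
  | cons c t ih =>
    intro pre acc hs
    have hlt : (pre.length : Int) < PySem.List.len s := by
      subst hs
      simp only [PySem.List.len_eq, List.length_append, List.length_cons]
      push_cast
      omega
    rw [PySem.List.pyRange_one_cons hlt]
    have hget : PySem.List.pyGetD s (pre.length) ' ' = c := by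
      subst hs
      simp [List.getD_eq_getElem?_getD, List.getElem?_append_right (Nat.le_refl pre.length)]
    have hget1 : PySem.List.pyGetD s ((pre.length : Int) + 1) ' ' = (t.headD ' ') := by
      subst hs
      have e : ((pre.length : Int) + 1) = ((pre.length + 1 : Nat) : Int) := by push_cast; ring
      rw [e, PySem.List.pyGetD_natCast]
      rcases t with _ | ⟨d, t'⟩
      · simp [List.getD_eq_getElem?_getD]
      · have e2 : pre ++ c :: d :: t' = (pre ++ [c]) ++ d :: t' := by simp
        rw [e2]
        simp [List.getD_eq_getElem?_getD,
          List.getElem?_append_right (by simp : (pre ++ [c]).length ≤ pre.length + 1)]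
    have hdot : isDotted (pre.length) s = decide (t.head? = some '.') := by
      unfold isDotted
      rcases ht : t.head? with _ | d
      · have ht' : t = [] := by cases t <;> simp_all
        subst ht'
        subst hs
        have hfalse : ¬ ((pre.length : Int) + 1 < ((pre ++ [c]).length : Int)) := by
          simp only [List.length_append, List.length_cons, List.length_nil]
          push_cast
          omega
        simp [PySem.List.len_eq, hfalse]
      · have hgt : PySem.List.len s > (pre.length : Int) + 1 := by
          subst hs
          cases t with
          | nil => simp at ht
          | cons d' t'' =>
            simp only [PySem.List.len_eq, List.length_append, List.length_cons]
            push_cast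
            omega
        simp only [hgt, decide_true, Bool.true_and, hget1]
        rcases eq_or_ne d '.' with rfl | hd
        · have : t.headD ' ' = '.' := by cases t <;> simp_all
          simp [this, ht]
        · have : t.headD ' ' = d := by cases t <;> simp_all
          simp [this, ht, hd]
    have hlen1 : (((pre ++ [c]).length : Nat) : Int) = (pre.length : Int) + 1 := by
      simp
    simp only [List.foldl_cons]
    rw [hget, hdot]
    by_cases hskip : c = '.' ∧ t.head? = some '.'
    · obtain ⟨rfl, ht⟩ := hskip
      rw [if_pos (by simp [ht])]
      have hcoll : collapse ('.' :: t) = collapse t := by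
        simp [collapse, ht]
      rw [hcoll]
      have ihx := ih (pre ++ ['.']) acc (by simp [hs])
      rw [hlen1] at ihx
      exact ihx
    · have hcond : ¬ (((c == '.') && decide (t.head? = some '.')) = true) := by
        simp only [Bool.and_eq_true, beq_iff_eq, decide_eq_true_eq]
        rintro ⟨hh1, hh2⟩
        exact hskip ⟨hh1, hh2⟩
      have hcoll : collapse (c :: t) = c :: collapse t := by
        simp only [collapse]
        rw [if_neg hskip]
      rw [if_neg hcond, hcoll]
      have ihx := ih (pre ++ [c]) (acc ++ [c]) (by simp [hs])
      rw [hlen1] at ihx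
      rw [ihx]
      simp

-- ----- the two leading/trailing dot strippers -----
lemma removeLeadingDots_eq_dropWhile (s : List Char) :
    removeLeadingDots s = s.dropWhile (· == '.') := by
  induction s with
  | nil => rfl
  | cons c t ih =>
    rcases eq_or_ne c '.' with rfl | hc
    · simp [removeLeadingDots, ih]
    · simp [removeLeadingDots, hc]

lemma rmEndDot_concat (xs : List Char) (x : Char) :
    rmEndDot (xs ++ [x]) = if x = '.' then rmEndDot xs else xs ++ [x] := by
  rw [rmEndDot]
  rcases eq_or_ne x '.' with rfl | hx
  · simp [List.dropLast_concat]
  · simp [List.getLast?_concat, hx]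

lemma rmEndDot_eq_rstripDots (s : List Char) : rmEndDot s = rstripDots s := by
  induction s using List.reverseRecOn with
  | nil => rw [rmEndDot]; simp [rstripDots]
  | append_singleton xs x ih =>
    rw [rmEndDot_concat]
    rcases eq_or_ne x '.' with rfl | hx
    · simp [rstripDots, List.reverse_append, ih]
    · simp [rstripDots, List.reverse_append, hx]

-- decomposition: s = rstripDots s ++ a run of dots
lemma rstripDots_decomp (s : List Char) :
    s = rstripDots s ++ List.replicate (s.length - (rstripDots s).length) '.' := by
  have h1 : (s.reverse.takeWhile (· == '.')) =
      List.replicate (s.reverse.takeWhile (· == '.')).length '.' := by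
    apply List.eq_replicate_of_mem
    intro b hb
    have := List.mem_takeWhile_imp hb
    simpa using this
  have h2 : s = (s.reverse.dropWhile (· == '.')).reverse ++ (s.reverse.takeWhile (· == '.')).reverse := by
    conv_lhs => rw [← List.reverse_reverse s,
      ← List.takeWhile_append_dropWhile (p := (· == '.')) (l := s.reverse)]
    rw [List.reverse_append]
  have h3 : s.length = (rstripDots s).length + (s.reverse.takeWhile (· == '.')).length := by
    conv_lhs => rw [h2]
    simp [rstripDots]
  rw [show s.length - (rstripDots s).length = (s.reverse.takeWhile (· == '.')).length by omega]
  conv_lhs => rw [h2]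
  congr 1
  conv_lhs => rw [h1]
  simp

lemma rstripDots_getLast? (s : List Char) : (rstripDots s).getLast? ≠ some '.' := by
  intro h
  have hh := List.head?_dropWhile_not (· == '.') s.reverse
  rw [rstripDots] at h
  rw [List.getLast?_reverse] at h
  rw [h] at hh
  simp at hh

lemma rstripDots_concat_dot (v : List Char) : rstripDots (v ++ ['.']) = rstripDots v := by
  simp [rstripDots, List.reverse_append]

lemma rstripDots_append_replicate (s : List Char) (m : Nat) :
    rstripDots (s ++ List.replicate m '.') = rstripDots s := by
  induction m with
  | zero => simp
  | succ k ih =>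
    have e : s ++ List.replicate (k + 1) '.' = (s ++ List.replicate k '.') ++ ['.'] := by
      simp [List.replicate_succ']
    rw [e, rstripDots_concat_dot, ih]

lemma rstripDots_of_getLast? (s : List Char) (h : s.getLast? ≠ some '.') :
    rstripDots s = s := by
  induction s using List.reverseRecOn with
  | nil => rfl
  | append_singleton xs x ih =>
    rw [List.getLast?_concat] at h
    have hx : x ≠ '.' := by intro e; exact h (by rw [e])
    simp [rstripDots, List.reverse_append, hx]

lemma rstripDots_idem (s : List Char) : rstripDots (rstripDots s) = rstripDots s :=
  rstripDots_of_getLast? _ (rstripDots_getLast? s)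

lemma rstripDots_take (s : List Char) (k : Nat)
    (h1 : (rstripDots s).length ≤ k) (h2 : k ≤ s.length) :
    rstripDots (s.take k) = rstripDots s := by
  conv_lhs => rw [rstripDots_decomp s]
  rw [List.take_append, List.take_of_length_le h1, List.take_replicate]
  have e : min (k - (rstripDots s).length) (s.length - (rstripDots s).length)
      = k - (rstripDots s).length := by omega
  rw [e, rstripDots_append_replicate, rstripDots_idem]

lemma take_rstripDots (s : List Char) (k : Nat) (h : k ≤ (rstripDots s).length) :
    (rstripDots s).take k = s.take k := by
  conv_rhs => rw [rstripDots_decomp s]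
  rw [List.take_append_of_le_length h]

-- ----- the truncation loop is take-15-then-rstrip -----
lemma truncLoop_eq (s : List Char) :
    truncLoop s = if 16 ≤ s.length then rstripDots (s.take 15) else s := by
  fun_induction truncLoop s with
  | case1 s hlen ih =>
    rw [rmEndDot_eq_rstripDots] at ih ⊢
    have hdl : s.dropLast.length = s.length - 1 := List.length_dropLast
    have htk : s.dropLast.take 15 = s.take 15 := by
      rw [List.dropLast_eq_take, List.take_take]
      congr 1
      omega
    rw [ih, if_pos hlen]
    by_cases h16 : 16 ≤ (rstripDots s.dropLast).length
    · rw [if_pos h16, take_rstripDots _ _ (by omega), htk]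
    · rw [if_neg h16, ← htk, rstripDots_take s.dropLast 15 (by omega) (by omega)]
  | case2 s hlen => rw [if_neg (by omega)]

-- ----- the padding loop -----
lemma padLoop_step (s : List Char) (h : s ≠ []) (h3 : s.length < 3) :
    padLoop s = padLoop (s ++ [s.getLast h]) := by
  rw [padLoop, if_pos ⟨List.length_pos_of_ne_nil h, h3⟩, PySem.List.pyGetD_neg_one _ _ h]

lemma padLoop_done (s : List Char) (h3 : 3 ≤ s.length) : padLoop s = s := by
  rw [padLoop, if_neg (by omega)]

lemma padLoop_eq (s : List Char) (h : s ≠ []) :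
    padLoop s = if s.length < 3 then s ++ List.replicate (3 - s.length) (s.getLast h) else s := by
  match s with
  | [c] =>
    have g1 : ∀ (hh : ([c] : List Char) ≠ []), ([c].getLast hh) = c := fun _ => rfl
    have g2 : ∀ (hh : (([c] : List Char) ++ [c]) ≠ []), (([c] ++ [c]).getLast hh) = c :=
      fun _ => rfl
    rw [padLoop_step _ (by simp) (by simp), g1]
    rw [padLoop_step _ (by simp) (by simp), g2]
    rw [padLoop_done _ (by simp)]
    rw [if_pos (by simp)]
    simp [List.replicate_succ]
  | [c, d] =>
    have g1 : ∀ (hh : ([c, d] : List Char) ≠ []), ([c, d].getLast hh) = d := fun _ => rfl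
    rw [padLoop_step _ (by simp) (by simp), g1]
    rw [padLoop_done _ (by simp)]
    rw [if_pos (by simp)]
    simp [List.replicate_succ]
  | c :: d :: e :: t =>
    rw [padLoop_done _ (by simp)]
    rw [if_neg (by simp)]

-- ----- B's fused loop -----
lemma foldl_fused (l : List Char) (p : Char → Bool) :
    ∀ acc : List Char,
    l.foldl (fun acc c => if p c then
        (if (c == '.') && (acc.getLast? == some '.') then acc else acc ++ [c]) else acc) acc
    = acc ++ goC acc.getLast? (l.filter p) := by
  induction l with
  | nil => intro acc; simp [goC]
  | cons c t ih =>
    intro acc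
    by_cases hp : p c
    · simp only [List.foldl_cons, hp, if_true, List.filter_cons_of_pos hp]
      by_cases hcd : c = '.' ∧ acc.getLast? = some '.'
      · rw [if_pos (by simp [hcd.1, hcd.2]), ih]
        congr 1
        simp only [goC]
        rw [if_pos hcd]
      · rw [if_neg (by simpa using hcd), ih, List.getLast?_concat]
        have e : goC acc.getLast? (c :: t.filter p) = c :: goC (some c) (t.filter p) := by
          simp only [goC]
          rw [if_neg hcd]
        rw [e]
        simp
    · simp only [List.foldl_cons, hp, if_false, List.filter_cons_of_neg hp]
      exact ih acc

lemma goC_eq_collapse_aux (l : List Char) :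
    (∀ p, p ≠ some '.' → goC p l = collapse l) ∧
    ('.' :: goC (some '.') l = collapse ('.' :: l)) := by
  induction l with
  | nil => exact ⟨fun p hp => rfl, by simp [goC, collapse]⟩
  | cons c t ih =>
    constructor
    · intro p hp
      rcases eq_or_ne c '.' with rfl | hc
      · have e : goC p ('.' :: t) = '.' :: goC (some '.') t := by
          simp only [goC]
          rw [if_neg (by simp [hp])]
        rw [e, ih.2]
      · have e : goC p (c :: t) = c :: goC (some c) t := by
          simp only [goC]
          rw [if_neg (by simp [hc])]
        rw [e, ih.1 (some c) (by simp [hc])]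
        simp [collapse, hc]
    · rcases eq_or_ne c '.' with rfl | hc
      · have e1 : goC (some '.') ('.' :: t) = goC (some '.') t := by
          simp [goC]
        have e2 : collapse ('.' :: '.' :: t) = collapse ('.' :: t) := by
          simp [collapse]
        rw [e1, e2, ih.2]
      · have e1 : goC (some '.') (c :: t) = c :: goC (some c) t := by
          simp only [goC]
          rw [if_neg (by simp [hc])]
        rw [e1, ih.1 (some c) (by simp [hc])]
        have e2 : collapse ('.' :: c :: t) = '.' :: collapse (c :: t) := by
          simp [collapse, hc]
        rw [e2]
        simp [collapse, hc]

lemma goC_none_eq_collapse (l : List Char) : goC none l = collapse l :=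
  (goC_eq_collapse_aux l).1 none (by simp)

-- B's strip step
lemma stripChars_dot (s : List Char) :
    PySem.Chars.stripChars s ['.'] = rstripDots (s.dropWhile (· == '.')) := by
  simp only [PySem.Chars.stripChars, rstripDots]
  rw [show (fun c => (['.'] : List Char).contains c) = (fun c : Char => c == '.') from
    funext contains_dot]

-- head of the stripped list survives the right strip
lemma head?_rstripDots (s : List Char) (h : rstripDots s ≠ []) :
    (rstripDots s).head? = s.head? := by
  conv_rhs => rw [rstripDots_decomp s]
  rcases he : rstripDots s with _ | ⟨c, t⟩
  · exact absurd he h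
  · simp

lemma rstripDots_ne_nil_of_head (s : List Char) (c : Char) (hc : c ≠ '.')
    (h : s.head? = some c) : rstripDots s ≠ [] := by
  intro he
  have hd := rstripDots_decomp s
  rw [he] at hd
  simp only [List.nil_append] at hd
  rw [hd] at h
  rcases hn : s.length - ([] : List Char).length with _ | k
  · rw [hn] at h; simp at h
  · rw [hn] at h
    simp [List.replicate_succ] at h
    exact hc h.symm

lemma loop2_eq_collapse (u : List Char) :
    (PySem.List.pyRange 0 (PySem.List.len u) 1).foldl
      (fun acc i => if (PySem.List.pyGetD u i ' ' == '.') && isDotted i u then acc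
        else acc ++ [PySem.List.pyGetD u i ' ']) [] = collapse u := by
  have h := foldl_range_collapse u u [] [] (by simp)
  simp only [List.length_nil, Nat.cast_zero, List.nil_append] at h
  exact h

lemma head?_strip_ne_dot (v : List Char) :
    (rstripDots (v.dropWhile (· == '.'))).head? ≠ some '.' := by
  intro h
  have hne : rstripDots (v.dropWhile (· == '.')) ≠ [] := by
    intro e
    rw [e] at h
    simp at h
  rw [head?_rstripDots _ hne] at h
  have hh := List.head?_dropWhile_not (· == '.') v
  rw [h] at hh
  simp at hh

-- the shared back end of both pipelines
lemma tail_eq (st : List Char) (hd : st.head? ≠ some '.') :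
    padLoop (truncLoop (if st.length = 0 then ['a'] else st))
    = (if (if st = [] then ['a'] else if st.length > 15
            then rstripDots (PySem.List.slice st none (some 15)) else st).length < 3
       then (if st = [] then ['a'] else if st.length > 15
            then rstripDots (PySem.List.slice st none (some 15)) else st)
            ++ List.replicate (3 - (if st = [] then ['a'] else if st.length > 15
                then rstripDots (PySem.List.slice st none (some 15)) else st).length)
               (PySem.List.pyGetD (if st = [] then ['a'] else if st.length > 15
                then rstripDots (PySem.List.slice st none (some 15)) else st) (-1) 'a')
       else (if st = [] then ['a'] else if st.length > 15
            then rstripDots (PySem.List.slice st none (some 15)) else st)) := by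
  rw [PySem.List.slice_to _ (by norm_num)]
  have e15 : ((15 : Int)).toNat = 15 := rfl
  rw [e15]
  by_cases hnil : st = []
  · subst hnil
    rw [if_pos rfl]
    rw [if_pos (show (([] : List Char)).length = 0 from rfl)]
    rw [truncLoop_eq, if_neg (by simp)]
    rw [padLoop_eq _ (by simp)]
    rw [if_pos (by simp), if_pos (by simp)]
    rw [PySem.List.pyGetD_neg_one _ _ (by simp)]
  · rw [if_neg (by simpa using hnil), if_neg hnil]
    by_cases h15 : st.length > 15
    · rw [if_pos h15]
      rw [truncLoop_eq, if_pos (by omega)]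
      have hne : rstripDots (st.take 15) ≠ [] := by
        rcases hstc : st with _ | ⟨c0, rest⟩
        · exact absurd hstc hnil
        · have hc0 : c0 ≠ '.' := by
            intro e
            rw [hstc, e] at hd
            simp at hd
          apply rstripDots_ne_nil_of_head _ c0 hc0
          simp [List.take_succ_cons]
      rw [padLoop_eq _ hne]
      rw [PySem.List.pyGetD_neg_one _ _ hne]
    · rw [if_neg h15]
      rw [truncLoop_eq, if_neg (by omega)]
      rw [padLoop_eq _ hnil]
      rw [PySem.List.pyGetD_neg_one _ _ hnil]

theorem solution_spec : Claim_equal_solution := by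
  intro new_id _
  unfold Spec_solution solution solution_alt
  simp only []
  rw [loop1_eq_filter, loop2_eq_collapse, removeLeadingDots_eq_dropWhile,
    rmEndDot_eq_rstripDots]
  rw [foldl_fused (PySem.Chars.lower new_id.toList)
    (fun c => PySem.Chars.isalpha c || PySem.Chars.isdigit c || ['.', '-', '_'].contains c) []]
  simp only [List.getLast?_nil, List.nil_append]
  rw [goC_none_eq_collapse, filter_keep_eq, stripChars_dot]
  exact congrArg String.ofList (tail_eq _ (head?_strip_ne_dot _))
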